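-- pv_equiv track=rewrite | github.com/salavey13/bestQuest | telegram_bot/data_scraping/subtle_rEvolution.py | divide_text_into_chapters_keyword_based
-- ===== SOURCE A (Python) =====
-- def divide_text_into_chapters_keyword_based(text, keywords):
--     chapters = []
--     current_chapter = []
--
--     for sentence in text.split('.'):
--         sentence = sentence.strip()
--         if any(keyword in sentence for keyword in keywords):
--             if current_chapter:
--                 chapters.append(' '.join(current_chapter))
--                 current_chapter = []
--         current_chapter.append(sentence)
--
--     if current_chapter:
--         chapters.append(' '.join(current_chapter))
--
--     return chapters
-- ===== SOURCE B (Python) =====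
-- def divide_text_into_chapters_keyword_based(text, keywords):
--     sentences = [s.strip() for s in text.split('.')]
--     boundaries = [i for i, s in enumerate(sentences)
--                   if any(k in s for k in keywords)]
--     chapters = []
--     start = 0
--     for b in boundaries:
--         if b > start:
--             chapters.append(' '.join(sentences[start:b]))
--             start = b
--     chapters.append(' '.join(sentences[start:]))
--     return chapters
-- ===== Notes on version B (the rewrite author's own statement) =====
-- stated objective: alternative
-- what changed: A flushes an accumulator on the fly while scanning sentences; B first computes the list of keyword-boundary indices and then emits chapters by slicing the stripped-sentence list between boundaries.
import Mathlib
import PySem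

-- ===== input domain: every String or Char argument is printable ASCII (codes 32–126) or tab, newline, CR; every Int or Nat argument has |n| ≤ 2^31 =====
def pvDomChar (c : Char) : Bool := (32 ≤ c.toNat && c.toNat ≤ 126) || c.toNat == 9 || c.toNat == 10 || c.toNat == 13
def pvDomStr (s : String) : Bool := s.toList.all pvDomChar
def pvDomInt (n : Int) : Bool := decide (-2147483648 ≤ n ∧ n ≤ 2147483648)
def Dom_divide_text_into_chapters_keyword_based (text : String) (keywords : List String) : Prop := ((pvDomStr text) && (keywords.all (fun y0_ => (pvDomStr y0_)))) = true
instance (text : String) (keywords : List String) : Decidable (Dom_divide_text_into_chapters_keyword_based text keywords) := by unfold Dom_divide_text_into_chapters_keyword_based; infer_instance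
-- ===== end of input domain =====

-- B replaces A's on-the-fly flushing accumulator by a two-pass structure (collect keyword
-- boundary indices, then emit chapters by slicing the stripped-sentence list); objective:
-- alternative decomposition, same asymptotic cost.

-- shared helper: any(keyword in s for keyword in keywords)
def pvKw (keywords : List String) (s : String) : Bool :=
  keywords.any (fun keyword => PySem.Str.isIn keyword s)

-- text.split('.') : separator "." is non-empty, so Python never raises; split? is `some` here
def pvSplitDot (text : String) : List String :=
  (PySem.Str.split? text ".").getD []

-- ===== PORT A =====
-- loop body of A: optionally flush the current chapter, then append the stripped sentence
def pvStepA (keywords : List String) (acc : List String × List String) (sentence : String) :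
    List String × List String :=
  let s := PySem.Str.strip sentence
  let acc2 :=
    if pvKw keywords s && !acc.2.isEmpty then
      (acc.1 ++ [PySem.Str.join " " acc.2], ([] : List String))
    else acc
  (acc2.1, acc2.2 ++ [s])

-- the trailing `if current_chapter: chapters.append(' '.join(current_chapter))`
def pvFinishA (st : List String × List String) : List String :=
  if st.2.isEmpty then st.1 else st.1 ++ [PySem.Str.join " " st.2]

def divide_text_into_chapters_keyword_based (text : String) (keywords : List String) : List String :=
  pvFinishA ((pvSplitDot text).foldl (pvStepA keywords) ([], []))

-- ===== PORT B =====
-- loop body of B: for each boundary b, if b > start emit ' '.join(sentences[start:b]) and move start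
def pvStepB (sentences : List String) (acc : List String × Int) (b : Int) : List String × Int :=
  if acc.2 < b then
    (acc.1 ++ [PySem.Str.join " " (PySem.List.slice sentences (some acc.2) (some b))], b)
  else acc

-- the trailing chapters.append(' '.join(sentences[start:]))
def pvFinishB (sentences : List String) (st : List String × Int) : List String :=
  st.1 ++ [PySem.Str.join " " (PySem.List.slice sentences (some st.2) none)]

def divide_text_into_chapters_keyword_based_alt (text : String) (keywords : List String) : List String :=
  let sentences := (pvSplitDot text).map PySem.Str.strip
  let boundaries :=
    ((PySem.List.enumerate sentences).filter (fun p => pvKw keywords p.2)).map (fun p => p.1)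
  pvFinishB sentences (boundaries.foldl (pvStepB sentences) ([], 0))

-- ===== PRECONDITION & SPEC =====
def Spec_divide_text_into_chapters_keyword_based (text : String) (keywords : List String) (out : List String) : Prop := out = divide_text_into_chapters_keyword_based_alt text keywords
instance (text : String) (keywords : List String) (out : List String) : Decidable (Spec_divide_text_into_chapters_keyword_based text keywords out) := by unfold Spec_divide_text_into_chapters_keyword_based; infer_instance

-- ===== CLAIM (what is proved, stated in full; the proofs are below) =====
def Claim_equal_divide_text_into_chapters_keyword_based : Prop := ∀ (text : String) (keywords : List String), Dom_divide_text_into_chapters_keyword_based text keywords → Spec_divide_text_into_chapters_keyword_based text keywords (divide_text_into_chapters_keyword_based text keywords)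

-- ===== LEMMAS AND PROOFS =====

-- the common shape both programs compute: chunks of stripped sentences, cut before each
-- keyword sentence unless the running chunk is empty
def pvChunks (P : String → Bool) : List String → List String → List String
  | cur, [] => if cur.isEmpty then [] else [PySem.Str.join " " cur]
  | cur, s :: rest =>
      if P s && !cur.isEmpty then PySem.Str.join " " cur :: pvChunks P [s] rest
      else pvChunks P (cur ++ [s]) rest

lemma pvSplitOnGo_ne_nil (sep : List Char) :
    ∀ (fuel : Nat) (l cur : List Char) (acc : List (List Char)),
      PySem.Chars.splitOn.go sep fuel l cur acc ≠ [] := by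
  intro fuel
  induction fuel with
  | zero => intro l cur acc; simp [PySem.Chars.splitOn.go]
  | succ n ih =>
    intro l cur acc
    cases l with
    | nil => simp [PySem.Chars.splitOn.go]
    | cons c rest =>
      rw [PySem.Chars.splitOn.go]
      split_ifs <;> apply ih

lemma pvSplitDot_ne_nil (text : String) : pvSplitDot text ≠ [] := by
  have h : PySem.Chars.splitOn text.toList ['.'] ≠ [] := pvSplitOnGo_ne_nil _ _ _ _ _
  simp [pvSplitDot, PySem.Str.split?, PySem.Chars.split?, h]

lemma pvAFold (keywords : List String) (l : List String) :
    ∀ (ch cur : List String),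
      pvFinishA (l.foldl (pvStepA keywords) (ch, cur))
        = ch ++ pvChunks (pvKw keywords) cur (l.map PySem.Str.strip) := by
  induction l with
  | nil => intro ch cur; by_cases h : cur.isEmpty <;> simp [pvFinishA, pvChunks, h]
  | cons x xs ih =>
    intro ch cur
    simp only [List.foldl_cons, List.map_cons, pvChunks]
    by_cases h : pvKw keywords (PySem.Str.strip x) && !cur.isEmpty <;>
      simp [pvStepA, h, ih, List.append_assoc]

lemma pvBFold (keywords sentences : List String) :
    ∀ (tail : List String) (k start : Nat) (ch : List String),
      start ≤ k → start < sentences.length → tail = sentences.drop k →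
      pvFinishB sentences
          ((((PySem.List.enumerate tail (k : Int)).filter
              (fun p => pvKw keywords p.2)).map (fun p => p.1)).foldl
            (pvStepB sentences) (ch, (start : Nat)))
        = ch ++ pvChunks (pvKw keywords) ((sentences.drop start).take (k - start)) tail := by
  intro tail
  induction tail with
  | nil =>
    intro k start ch hsk hsn htail
    have hk : sentences.length ≤ k := by
      have := congrArg List.length htail
      simp at this; omega
    have hdrop : (sentences.drop start).take (k - start) = sentences.drop start :=
      List.take_of_length_le (by simp; omega)
    have hne : sentences.drop start ≠ [] := by
      apply List.ne_nil_of_length_pos; simp; omega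
    simp [pvFinishB, pvChunks, PySem.List.enumerate, hdrop, hne,
      PySem.List.slice_from_natCast]
  | cons t rest ih =>
    intro k start ch hsk hsn htail
    have hkn : k < sentences.length := by
      by_contra hkn
      rw [List.drop_eq_nil_of_le (by omega)] at htail
      exact List.cons_ne_nil _ _ htail
    have hrest : rest = sentences.drop (k + 1) := by
      have := congrArg List.tail htail
      simpa [List.tail_drop] using this
    have htake : ∀ s : Nat, s ≤ k →
        (sentences.drop s).take (k + 1 - s) = (sentences.drop s).take (k - s) ++ [t] := by
      intro s hs
      have h1 : k + 1 - s = (k - s) + 1 := by omega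
      rw [h1, List.take_add]
      congr 1
      rw [List.drop_drop]
      have h2 : s + (k - s) = k := by omega
      rw [h2, ← htail]
      simp
    rw [PySem.List.enumerate_cons]
    by_cases hP : pvKw keywords t
    · simp only [List.filter_cons, hP, reduceIte, List.map_cons]
      rw [List.foldl_cons]
      by_cases hlt : start < k
      · have hstep : pvStepB sentences (ch, (start : Int)) (k : Int)
            = (ch ++ [PySem.Str.join " " ((sentences.drop start).take (k - start))], (k : Int)) := by
          simp [pvStepB, hlt, PySem.List.slice_natCast]
        rw [hstep]
        have hcast : (k : Int) + 1 = ((k + 1 : Nat) : Int) := by push_cast; ring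
        rw [hcast]
        rw [ih (k + 1) k _ (by omega) hkn hrest]
        have hcur : ¬ ((sentences.drop start).take (k - start)).isEmpty := by
          simp [List.isEmpty_iff, List.take_eq_nil_iff]
          omega
        have h1 : (sentences.drop k).take 1 = [t] := by rw [← htail]; simp
        have hsub : k + 1 - k = 1 := by omega
        simp [pvChunks, hP, hcur, hsub, h1, List.append_assoc]
      · have hse : start = k := by omega
        subst hse
        have hstep : pvStepB sentences (ch, (start : Int)) (start : Int) = (ch, (start : Int)) := by
          simp [pvStepB]
        rw [hstep]
        have hcast : ((start : Nat) : Int) + 1 = ((start + 1 : Nat) : Int) := by push_cast; ring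
        rw [hcast]
        rw [ih (start + 1) start _ (by omega) hsn (by rw [hrest])]
        have h1 : (sentences.drop start).take 1 = [t] := by rw [← htail]; simp
        have hsub : start + 1 - start = 1 := by omega
        simp [pvChunks, hP, hsub, h1]
    · have hcast : (k : Int) + 1 = ((k + 1 : Nat) : Int) := by push_cast; ring
      simp only [List.filter_cons, hP, Bool.false_eq_true, reduceIte, hcast]
      rw [ih (k + 1) start ch (by omega) hsn hrest]
      rw [htake start hsk]
      simp [pvChunks, hP]

-- ===== VERDICT (by name: the statement is the Claim_ definition above) =====
theorem divide_text_into_chapters_keyword_based_spec : Claim_equal_divide_text_into_chapters_keyword_based := by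
  intro text keywords _
  unfold Spec_divide_text_into_chapters_keyword_based
  unfold divide_text_into_chapters_keyword_based divide_text_into_chapters_keyword_based_alt
  have hA := pvAFold keywords (pvSplitDot text) [] []
  have hne : ((pvSplitDot text).map PySem.Str.strip) ≠ [] := by
    simpa using pvSplitDot_ne_nil text
  have hB := pvBFold keywords ((pvSplitDot text).map PySem.Str.strip)
      ((pvSplitDot text).map PySem.Str.strip) 0 0 []
      (le_refl 0) (List.length_pos_of_ne_nil hne) (by simp)
  simp only [Nat.cast_zero, Nat.sub_self, List.take_zero, List.drop_zero] at hB
  rw [hA, ← hB]
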